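-- pv_equiv track=rewrite | github.com/jennyqsun/evidence-chain | analysis/analysis_util.py | get_max_runs
-- ===== SOURCE A (Python) =====
-- def get_max_runs(x_train):
--     runs = []
--     for chain in x_train:
--         result_p, result_n, counter_p, counter_n = 0, 0, 0, 0
--         for n in chain:
--             counter_p = (counter_p + 1) if n == 1 else 0
--             result_p = max(counter_p, result_p)
--             counter_n = (counter_n + 1) if n == -1 else 0
--             result_n = max(counter_n, result_n)
--         max_run = max(result_p, result_n)
--         runs.append(max_run)
--     return runs
-- ===== SOURCE B (Python) =====
-- def _best(chain):
--     # run-skipping scan: find each maximal run, consider it if its value is +-1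
--     best = 0
--     while chain:
--         x = chain[0]
--         k = 1
--         while k < len(chain) and chain[k] == x:
--             k += 1
--         if x == 1 or x == -1:
--             best = max(best, k)
--         chain = chain[k:]
--     return best
--
-- def get_max_runs(x_train):
--     return [_best(chain) for chain in x_train]
-- ===== Notes on version B (the rewrite author's own statement) =====
-- stated objective: alternative
-- what changed: Replaces A's two simultaneous +1/-1 counters per element with a run-skipping scan: each maximal run of equal values is measured once and contributes its length if its value is +-1.
import Mathlib
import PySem

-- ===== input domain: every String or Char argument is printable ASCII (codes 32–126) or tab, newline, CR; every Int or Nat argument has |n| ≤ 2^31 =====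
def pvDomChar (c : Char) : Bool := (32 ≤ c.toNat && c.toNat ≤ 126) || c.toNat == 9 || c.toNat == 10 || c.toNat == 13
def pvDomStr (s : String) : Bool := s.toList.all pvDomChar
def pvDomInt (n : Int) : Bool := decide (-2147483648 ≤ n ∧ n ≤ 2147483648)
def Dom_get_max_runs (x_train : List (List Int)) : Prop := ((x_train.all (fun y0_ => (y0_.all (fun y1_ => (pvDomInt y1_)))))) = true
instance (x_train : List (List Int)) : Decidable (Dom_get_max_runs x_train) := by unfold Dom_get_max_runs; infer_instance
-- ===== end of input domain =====

-- B replaces A's two simultaneous +1/-1 counters by a run-skipping scan over maximal runs (alternative decomposition, same cost).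


-- ===== PORT A =====
-- A's inner-loop body: updates (result_p, result_n, counter_p, counter_n) for one element n
def stepA (st : Int × Int × Int × Int) (n : Int) : Int × Int × Int × Int :=
  let cp' := if n = 1 then st.2.2.1 + 1 else 0
  let rp' := max cp' st.1
  let cn' := if n = -1 then st.2.2.2 + 1 else 0
  let rn' := max cn' st.2.1
  (rp', rn', cp', cn')

def get_max_runs (x_train : List (List Int)) : List Int :=
  x_train.foldl (fun runs chain =>
    let s := chain.foldl stepA (0, 0, 0, 0)
    runs ++ [max s.1 s.2.1]) []

-- ===== PORT B =====
-- B's while loop over maximal runs, `best` accumulator; chain[k:] becomes dropWhile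
def bestLoop (best : Int) : List Int → Int
  | [] => best
  | x :: xs =>
    let k : Int := (xs.takeWhile (· == x)).length + 1
    let best' := if x = 1 ∨ x = -1 then max best k else best
    bestLoop best' (xs.dropWhile (· == x))
termination_by l => l.length
decreasing_by
  simp only [List.length_cons]
  exact Nat.lt_succ_of_le (xs.length_dropWhile_le _)

def get_max_runs_alt (x_train : List (List Int)) : List Int :=
  x_train.map (fun chain => bestLoop 0 chain)

-- ===== PRECONDITION & SPEC =====
def Spec_get_max_runs (x_train : List (List Int)) (out : List Int) : Prop := out = get_max_runs_alt x_train
instance (x_train : List (List Int)) (out : List Int) : Decidable (Spec_get_max_runs x_train out) := by unfold Spec_get_max_runs; infer_instance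

-- ===== CLAIM (what is proved, stated in full; the proofs are below) =====
def Claim_equal_get_max_runs : Prop := ∀ (x_train : List (List Int)), Dom_get_max_runs x_train → Spec_get_max_runs x_train (get_max_runs x_train)

-- ===== LEMMAS AND PROOFS =====

-- folding A's step over a run of 1s (counter_n clean)
lemma fold_run_one (run : List Int) (h : ∀ a ∈ run, a = (1 : Int)) (rp rn cp : Int)
    (h1 : 0 ≤ cp) (h2 : cp ≤ rp) (h3 : 0 ≤ rn) :
    run.foldl stepA (rp, rn, cp, 0) = (max (cp + run.length) rp, rn, cp + run.length, 0) := by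
  induction run generalizing rp cp with
  | nil =>
    simp only [List.foldl_nil, List.length_nil]
    refine Prod.ext ?_ (Prod.ext ?_ ?_) <;> simp <;> omega
  | cons a t ih =>
    have ha : a = 1 := h a (List.mem_cons_self ..)
    have ht : ∀ b ∈ t, b = (1 : Int) := fun b hb => h b (List.mem_cons_of_mem _ hb)
    subst ha
    simp only [List.foldl_cons, stepA, reduceIte,
      show ((1 : Int) = -1) ↔ False by decide, if_false]
    have hrn : max (0 : Int) rn = rn := by omega
    rw [hrn]
    rw [ih ht (max (cp + 1) rp) (cp + 1) (by omega) (by omega)]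
    simp only [List.length_cons]
    refine Prod.ext ?_ (Prod.ext rfl (Prod.ext ?_ rfl)) <;> push_cast <;> omega

-- folding A's step over a run of -1s (counter_p clean)
lemma fold_run_negone (run : List Int) (h : ∀ a ∈ run, a = (-1 : Int)) (rp rn cn : Int)
    (h1 : 0 ≤ cn) (h2 : cn ≤ rn) (h3 : 0 ≤ rp) :
    run.foldl stepA (rp, rn, 0, cn) = (rp, max (cn + run.length) rn, 0, cn + run.length) := by
  induction run generalizing rn cn with
  | nil =>
    simp only [List.foldl_nil, List.length_nil]
    refine Prod.ext rfl (Prod.ext ?_ ?_) <;> simp <;> omega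
  | cons a t ih =>
    have ha : a = -1 := h a (List.mem_cons_self ..)
    have ht : ∀ b ∈ t, b = (-1 : Int) := fun b hb => h b (List.mem_cons_of_mem _ hb)
    subst ha
    simp only [List.foldl_cons, stepA, reduceIte,
      show ((-1 : Int) = 1) ↔ False by decide, if_false]
    have hrp : max (0 : Int) rp = rp := by omega
    rw [hrp]
    rw [ih ht (max (cn + 1) rn) (cn + 1) (by omega) (by omega)]
    simp only [List.length_cons]
    refine Prod.ext rfl (Prod.ext ?_ (Prod.ext rfl ?_)) <;> push_cast <;> omega

-- folding A's step over a run of values that are neither 1 nor -1 (counters clean)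
lemma fold_run_other (run : List Int) (x : Int) (hx1 : x ≠ 1) (hx2 : x ≠ -1)
    (h : ∀ a ∈ run, a = x) (rp rn : Int) (hrp : 0 ≤ rp) (hrn : 0 ≤ rn) :
    run.foldl stepA (rp, rn, 0, 0) = (rp, rn, 0, 0) := by
  induction run with
  | nil => rfl
  | cons a t ih =>
    have ha : a = x := h a (List.mem_cons_self ..)
    have ht : ∀ b ∈ t, b = x := fun b hb => h b (List.mem_cons_of_mem _ hb)
    subst ha
    simp only [List.foldl_cons, stepA, if_neg hx1, if_neg hx2]
    have h1 : max (0 : Int) rp = rp := by omega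
    have h2 : max (0 : Int) rn = rn := by omega
    rw [h1, h2]
    exact ih ht

-- the first step of A resets counter_p when the head is not 1
lemma fold_reset_cp (rest : List Int) (h : ∀ y, rest.head? = some y → y ≠ 1)
    (rp rn cp : Int) :
    (rest.foldl stepA (rp, rn, cp, 0)).1 = (rest.foldl stepA (rp, rn, 0, 0)).1 ∧
      (rest.foldl stepA (rp, rn, cp, 0)).2.1 = (rest.foldl stepA (rp, rn, 0, 0)).2.1 := by
  cases rest with
  | nil => exact ⟨rfl, rfl⟩
  | cons y t =>
    have hy : y ≠ 1 := h y rfl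
    have heq : (y :: t).foldl stepA (rp, rn, cp, 0) = (y :: t).foldl stepA (rp, rn, 0, 0) := by
      simp only [List.foldl_cons, stepA, if_neg hy]
    exact ⟨by rw [heq], by rw [heq]⟩

-- the first step of A resets counter_n when the head is not -1
lemma fold_reset_cn (rest : List Int) (h : ∀ y, rest.head? = some y → y ≠ -1)
    (rp rn cn : Int) :
    (rest.foldl stepA (rp, rn, 0, cn)).1 = (rest.foldl stepA (rp, rn, 0, 0)).1 ∧
      (rest.foldl stepA (rp, rn, 0, cn)).2.1 = (rest.foldl stepA (rp, rn, 0, 0)).2.1 := by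
  cases rest with
  | nil => exact ⟨rfl, rfl⟩
  | cons y t =>
    have hy : y ≠ -1 := h y rfl
    have heq : (y :: t).foldl stepA (rp, rn, 0, cn) = (y :: t).foldl stepA (rp, rn, 0, 0) := by
      simp only [List.foldl_cons, stepA, if_neg hy]
    exact ⟨by rw [heq], by rw [heq]⟩

-- main invariant: A's inner fold from clean counters computes B's run scan
theorem chain_main (chain : List Int) (rp rn : Int) (hrp : 0 ≤ rp) (hrn : 0 ≤ rn) :
    max (chain.foldl stepA (rp, rn, 0, 0)).1 (chain.foldl stepA (rp, rn, 0, 0)).2.1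
      = bestLoop (max rp rn) chain := by
  match chain with
  | [] => simp [bestLoop]
  | x :: xs =>
    have hsplit : xs = xs.takeWhile (· == x) ++ xs.dropWhile (· == x) :=
      (List.takeWhile_append_dropWhile).symm
    have hrun : ∀ a ∈ xs.takeWhile (· == x), a = x := by
      intro a ha
      simpa using List.mem_takeWhile_imp ha
    have hresthead : ∀ y, (xs.dropWhile (· == x)).head? = some y → y ≠ x := by
      intro y hy
      have := List.head?_dropWhile_not (· == x) xs
      rw [hy] at this
      simpa using this
    have hcons : x :: xs = (x :: xs.takeWhile (· == x)) ++ xs.dropWhile (· == x) := by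
      rw [List.cons_append, ← hsplit]
    have hfold : (x :: xs).foldl stepA (rp, rn, (0 : Int), (0 : Int)) =
        (xs.dropWhile (· == x)).foldl stepA
          ((x :: xs.takeWhile (· == x)).foldl stepA (rp, rn, 0, 0)) := by
      conv_lhs => rw [hcons]
      rw [List.foldl_append]
    have hlen : (xs.dropWhile (· == x)).length < (x :: xs).length := by
      simp only [List.length_cons]
      exact Nat.lt_succ_of_le (xs.length_dropWhile_le _)
    rw [bestLoop, hfold]
    by_cases hx1 : x = 1
    · subst hx1
      have hall : ∀ a ∈ (1 : Int) :: xs.takeWhile (· == (1 : Int)), a = (1 : Int) := by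
        intro a ha
        rcases List.mem_cons.mp ha with h | h
        · exact h
        · exact hrun a h
      rw [fold_run_one _ hall rp rn 0 le_rfl hrp hrn]
      rw [(fold_reset_cp _ (fun y hy => hresthead y hy) _ _ _).1,
          (fold_reset_cp _ (fun y hy => hresthead y hy) _ _ _).2]
      have hrec := chain_main (xs.dropWhile (· == (1 : Int)))
        (max (0 + ((1 : Int) :: xs.takeWhile (· == (1 : Int))).length) rp) rn
        (by positivity) hrn
      rw [hrec]
      rw [if_pos (Or.inl rfl)]
      congr 1
      simp only [List.length_cons]
      push_cast
      omega
    · by_cases hx2 : x = -1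
      · subst hx2
        have hall : ∀ a ∈ (-1 : Int) :: xs.takeWhile (· == (-1 : Int)), a = (-1 : Int) := by
          intro a ha
          rcases List.mem_cons.mp ha with h | h
          · exact h
          · exact hrun a h
        rw [fold_run_negone _ hall rp rn 0 le_rfl hrn hrp]
        rw [(fold_reset_cn _ (fun y hy => hresthead y hy) _ _ _).1,
            (fold_reset_cn _ (fun y hy => hresthead y hy) _ _ _).2]
        have hrec := chain_main (xs.dropWhile (· == (-1 : Int)))
          rp (max (0 + ((-1 : Int) :: xs.takeWhile (· == (-1 : Int))).length) rn)
          hrp (by positivity)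
        rw [hrec]
        rw [if_pos (Or.inr rfl)]
        congr 1
        simp only [List.length_cons]
        push_cast
        omega
      · have hall : ∀ a ∈ x :: xs.takeWhile (· == x), a = x := by
          intro a ha
          rcases List.mem_cons.mp ha with h | h
          · exact h
          · exact hrun a h
        rw [fold_run_other _ x hx1 hx2 hall rp rn hrp hrn]
        rw [if_neg (by tauto)]
        exact chain_main (xs.dropWhile (· == x)) rp rn hrp hrn
termination_by chain.length
decreasing_by
  all_goals
    simp only [List.length_cons]
    exact Nat.lt_succ_of_le (List.length_dropWhile_le _ _)

-- A's outer append-fold is a map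
lemma foldl_append_map (f : List Int → Int) (l : List (List Int)) (acc : List Int) :
    l.foldl (fun runs chain => runs ++ [f chain]) acc = acc ++ l.map f := by
  induction l generalizing acc with
  | nil => simp
  | cons c t ih => simp [ih]

-- ===== VERDICT (by name: the statement is the Claim_ definition above) =====
theorem get_max_runs_spec : Claim_equal_get_max_runs := by
  intro x_train _
  unfold Spec_get_max_runs get_max_runs get_max_runs_alt
  rw [foldl_append_map (fun chain =>
    max ((chain.foldl stepA (0, 0, 0, 0)).1) ((chain.foldl stepA (0, 0, 0, 0)).2.1)) x_train []]
  simp only [List.nil_append]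
  apply List.map_congr_left
  intro chain _
  have := chain_main chain 0 0 le_rfl le_rfl
  simpa using this
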